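-- pv_equiv track=rewrite | github.com/SimonDufLab/Maxwell_demon | source/utils/utils.py | extract_ordered_layers
-- ===== SOURCE A (Python) =====
-- def extract_ordered_layers(params):
--     """Extract layer list. Based on `extract_layer_lists`. Here however, we group together
--      layers in block for pruning"""
--     layers_name = list(params.keys())
--     ordered_layers = []
--     curr_block = [layers_name[0]]
--     for layer in layers_name[1:]:
--         if "conv" in layer or 'linear' in layer or "logits" in layer:
--             ordered_layers.append(curr_block)
--             curr_block = [layer]
--         else:
--             curr_block.append(layer)
--
--     return ordered_layers
-- ===== SOURCE B (Python) =====
-- def extract_ordered_layers(params):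
--     """Extract layer list, grouping layers into pruning blocks.
--
--     Re-implementation: instead of accumulating a current block element by
--     element and flushing it at each boundary, repeatedly scan forward for the
--     NEXT boundary and emit the whole slice up to it; the final open block is
--     never emitted, matching the original.  Returns [] for an empty dict where
--     the original raises IndexError (see Pre_/Raises_).
--     """
--     layers_name = list(params.keys())
--     if not layers_name:
--         return []
--
--     def is_boundary(name):
--         return "conv" in name or "linear" in name or "logits" in name
--
--     blocks = []
--     cur = [layers_name[0]]
--     rest = layers_name[1:]
--     while True:
--         k = 0
--         while k < len(rest) and not is_boundary(rest[k]):
--             k += 1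
--         if k == len(rest):
--             return blocks
--         blocks.append(cur + rest[:k])
--         cur = [rest[k]]
--         rest = rest[k + 1:]
-- ===== Notes on version B (the rewrite author's own statement) =====
-- stated objective: alternative
-- what changed: Replaced the accumulate-and-flush loop (append to current block, flush on boundary) with a scan-to-next-boundary-and-slice loop that emits each complete block in one step and stops when no further boundary exists, which drops the final open block naturally.
-- crash fix: On an empty params dict A raises IndexError (layers_name[0]); B returns []. — e.g. on extract_ordered_layers([]): A raises IndexError, B returns []
import Mathlib
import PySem

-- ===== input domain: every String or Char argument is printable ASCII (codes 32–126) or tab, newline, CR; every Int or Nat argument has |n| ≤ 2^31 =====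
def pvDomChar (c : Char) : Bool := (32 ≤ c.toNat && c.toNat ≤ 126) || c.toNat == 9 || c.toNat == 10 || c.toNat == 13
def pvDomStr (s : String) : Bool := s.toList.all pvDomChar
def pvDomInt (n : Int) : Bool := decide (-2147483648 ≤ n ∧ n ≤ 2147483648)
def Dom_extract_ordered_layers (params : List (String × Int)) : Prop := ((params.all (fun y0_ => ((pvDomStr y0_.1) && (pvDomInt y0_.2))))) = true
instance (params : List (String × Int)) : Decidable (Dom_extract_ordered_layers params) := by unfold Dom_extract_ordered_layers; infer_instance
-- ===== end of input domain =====

-- B replaces A's accumulate-and-flush loop by a scan-to-next-boundary-and-slice loop (objective: alternative; B also returns [] where A raises on an empty dict).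

-- ===== PORT A =====
-- list(params.keys()): keys in insertion order, first occurrence wins
def extract_ordered_layers (params : List (String × Int)) : List (List String) :=
  let layers_name := PySem.List.dedup (params.map Prod.fst)
  let st := (layers_name.drop 1).foldl
    (fun (st : List (List String) × List String) layer =>
      if PySem.Str.isIn "conv" layer || PySem.Str.isIn "linear" layer || PySem.Str.isIn "logits" layer
      then (st.1 ++ [st.2], [layer])
      else (st.1, st.2 ++ [layer]))
    ([], [PySem.List.pyGetD layers_name 0 ""])
  st.1

-- ===== PORT B =====
def pvIsBoundary (name : String) : Bool :=
  PySem.Str.isIn "conv" name || PySem.Str.isIn "linear" name || PySem.Str.isIn "logits" name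

-- B's outer while loop; the inner index scan 'while k < len(rest) and not is_boundary(rest[k])'
-- computes exactly the takeWhile/dropWhile split of `rest` at the first boundary:
-- rest[:k] = takeWhile, rest[k] = head of dropWhile, rest[k+1:] = its tail.
def pvBlocks (cur : List String) (rest : List String) : List (List String) :=
  match _h : rest.dropWhile (fun l => !pvIsBoundary l) with
  | [] => []
  | b :: rest' => (cur ++ rest.takeWhile (fun l => !pvIsBoundary l)) :: pvBlocks [b] rest'
termination_by rest.length
decreasing_by
  have hle := List.length_dropWhile_le (p := fun l => !pvIsBoundary l) (l := rest)
  rw [_h] at hle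
  simp at hle ⊢
  omega

def extract_ordered_layers_alt (params : List (String × Int)) : List (List String) :=
  let layers_name := PySem.List.dedup (params.map Prod.fst)
  match layers_name with
  | [] => []
  | h :: t => pvBlocks [h] t

-- ===== PRECONDITION & SPEC =====
-- Pre_ excludes only the empty dict, on which A raises IndexError at layers_name[0].
def Pre_extract_ordered_layers (params : List (String × Int)) : Prop := params ≠ []
instance (params : List (String × Int)) : Decidable (Pre_extract_ordered_layers params) := by
  unfold Pre_extract_ordered_layers; infer_instance
def pvWitness_extract_ordered_layers : (List (String × Int)) := [("conv1", 0), ("bn1", 1), ("conv2", 2)]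

-- On the empty params dict A raises IndexError (layers_name[0]); B returns [].
def Raises_extract_ordered_layers (params : List (String × Int)) : Prop := params = []
instance (params : List (String × Int)) : Decidable (Raises_extract_ordered_layers params) := by
  unfold Raises_extract_ordered_layers; infer_instance
def pvRaiseWitness_extract_ordered_layers : (List (String × Int)) := []
def pvRaiseWitnessOut_extract_ordered_layers : List (List String) := []

def Spec_extract_ordered_layers (params : List (String × Int)) (out : List (List String)) : Prop := out = extract_ordered_layers_alt params
instance (params : List (String × Int)) (out : List (List String)) : Decidable (Spec_extract_ordered_layers params out) := by unfold Spec_extract_ordered_layers; infer_instance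

-- ===== CLAIM (what is proved, stated in full; the proofs are below) =====
def Claim_equal_extract_ordered_layers : Prop := ∀ (params : List (String × Int)), Dom_extract_ordered_layers params → Pre_extract_ordered_layers params → Spec_extract_ordered_layers params (extract_ordered_layers params)
def Claim_raises_extract_ordered_layers : Prop := (∀ (params : List (String × Int)), Dom_extract_ordered_layers params → Raises_extract_ordered_layers params → ¬ Pre_extract_ordered_layers params) ∧ (Dom_extract_ordered_layers (pvRaiseWitness_extract_ordered_layers) ∧ Raises_extract_ordered_layers (pvRaiseWitness_extract_ordered_layers) ∧ extract_ordered_layers_alt (pvRaiseWitness_extract_ordered_layers) = pvRaiseWitnessOut_extract_ordered_layers)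

-- ===== LEMMAS AND PROOFS =====

-- Unfolding equations of pvBlocks, by shape of the first-boundary split
theorem pvBlocks_of_dropWhile_nil (cur rest : List String)
    (h : rest.dropWhile (fun l => !pvIsBoundary l) = []) : pvBlocks cur rest = [] := by
  rw [pvBlocks]; split <;> simp_all

theorem pvBlocks_of_dropWhile_cons (cur rest : List String) (b : String) (rest' : List String)
    (h : rest.dropWhile (fun l => !pvIsBoundary l) = b :: rest') :
    pvBlocks cur rest = (cur ++ rest.takeWhile (fun l => !pvIsBoundary l)) :: pvBlocks [b] rest' := by
  rw [pvBlocks]; split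
  · simp_all
  · rename_i b' rest'' heq
    rw [h] at heq
    cases heq
    rfl

-- A's flush loop, started with closed blocks `acc` and open block `cur`,
-- produces `acc` followed by B's scan-and-slice blocks.
theorem pvFoldl_eq_blocks (rest : List String) (acc : List (List String)) (cur : List String) :
    (rest.foldl
      (fun (st : List (List String) × List String) layer =>
        if PySem.Str.isIn "conv" layer || PySem.Str.isIn "linear" layer || PySem.Str.isIn "logits" layer
        then (st.1 ++ [st.2], [layer])
        else (st.1, st.2 ++ [layer]))
      (acc, cur)).1 = acc ++ pvBlocks cur rest := by
  induction rest generalizing acc cur with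
  | nil => rw [pvBlocks_of_dropWhile_nil cur [] rfl]; simp
  | cons l rest ih =>
    by_cases hb : pvIsBoundary l = true
    · have hb' : (PySem.Str.isIn "conv" l || PySem.Str.isIn "linear" l || PySem.Str.isIn "logits" l) = true := by
        simpa [pvIsBoundary] using hb
      rw [List.foldl_cons]
      simp only [hb', if_pos]
      rw [ih, pvBlocks_of_dropWhile_cons cur (l :: rest) l rest (by simp [hb]),
        List.takeWhile_cons_of_neg (by simp [hb])]
      simp
    · have hb' : (PySem.Str.isIn "conv" l || PySem.Str.isIn "linear" l || PySem.Str.isIn "logits" l) = false := by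
        simpa [pvIsBoundary] using hb
      have hdrop : (l :: rest).dropWhile (fun l => !pvIsBoundary l) = rest.dropWhile (fun l => !pvIsBoundary l) :=
        List.dropWhile_cons_of_pos (by simp [hb])
      rw [List.foldl_cons]
      simp only [hb', Bool.false_eq_true, if_neg, not_false_iff]
      rw [ih]
      cases hd : rest.dropWhile (fun l => !pvIsBoundary l) with
      | nil =>
        rw [pvBlocks_of_dropWhile_nil _ _ hd, pvBlocks_of_dropWhile_nil _ _ (hdrop.trans hd)]
      | cons b rest' =>
        rw [pvBlocks_of_dropWhile_cons _ _ _ _ hd, pvBlocks_of_dropWhile_cons _ _ _ _ (hdrop.trans hd),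
          List.takeWhile_cons_of_pos (by simp [hb])]
        simp

-- ===== VERDICT (by name: the statement is the Claim_ definition above) =====
theorem extract_ordered_layers_spec : Claim_equal_extract_ordered_layers := by
  intro params _ hpre
  unfold Spec_extract_ordered_layers extract_ordered_layers extract_ordered_layers_alt
  cases params with
  | nil => exact absurd rfl hpre
  | cons p ps =>
    simp only [List.map_cons, PySem.List.dedup_eq_ofList, PySem.Set.ofList_cons]
    rw [List.drop_one, List.tail_cons, PySem.List.pyGetD_zero_cons]
    exact pvFoldl_eq_blocks _ [] [p.1]

theorem extract_ordered_layers_raises : Claim_raises_extract_ordered_layers := by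
  unfold Claim_raises_extract_ordered_layers
  constructor
  · intro params _ hr
    unfold Pre_extract_ordered_layers
    simp [Raises_extract_ordered_layers] at hr
    simp [hr]
  · exact ⟨by decide, by decide, by decide⟩

-- self-check: the raise witness indeed lies outside Pre_ (via extract_ordered_layers_raises)
theorem pvRaiseWitness_ok : ¬ Pre_extract_ordered_layers pvRaiseWitness_extract_ordered_layers :=
  extract_ordered_layers_raises.1 pvRaiseWitness_extract_ordered_layers (by decide) (by decide)
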